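-- pv_equiv track=rewrite | github.com/Ming-Sir-69/Taguchi-Orthogonal-Array-Custom-Generation | Taguchi-Orthogonal-Array-Custom-Generation/orthogonal_array_v2.py | check_orthogonality
-- ===== SOURCE A (Python) =====
-- def check_orthogonality(oa, factors):
--     n_factors = len(factors)
--     for i in range(n_factors):
--         for j in range(i+1, n_factors):
--             combinations = set((row[i], row[j]) for row in oa)
--             if len(combinations) != factors[chr(65+i)] * factors[chr(65+j)]:
--                 return False
--     return True
-- ===== SOURCE B (Python) =====
-- def check_orthogonality(oa, factors):
--     n = len(factors)
--     pairs = [(i, j) for i in range(n) for j in range(i + 1, n)]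
--     seen = {p: set() for p in pairs}
--     for row in oa:
--         for i, j in pairs:
--             seen[(i, j)].add((row[i], row[j]))
--     for i, j in pairs:
--         if len(seen[(i, j)]) != factors[chr(65 + i)] * factors[chr(65 + j)]:
--             return False
--     return True
-- ===== Notes on version B (the rewrite author's own statement) =====
-- stated objective: alternative
-- what changed: A loops over column pairs and rescans all rows once per pair; B makes a single pass over the rows building a dict from each column pair (i<j) to the set of observed value pairs, then a separate lexicographic check pass compares each set's size to the level product with the same early False return.
-- outside the precondition, e.g. on check_orthogonality([[0, 0]], {'A': 2, 'B': 2, 'X': 9}): A returns False, B raises IndexError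
import Mathlib
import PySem

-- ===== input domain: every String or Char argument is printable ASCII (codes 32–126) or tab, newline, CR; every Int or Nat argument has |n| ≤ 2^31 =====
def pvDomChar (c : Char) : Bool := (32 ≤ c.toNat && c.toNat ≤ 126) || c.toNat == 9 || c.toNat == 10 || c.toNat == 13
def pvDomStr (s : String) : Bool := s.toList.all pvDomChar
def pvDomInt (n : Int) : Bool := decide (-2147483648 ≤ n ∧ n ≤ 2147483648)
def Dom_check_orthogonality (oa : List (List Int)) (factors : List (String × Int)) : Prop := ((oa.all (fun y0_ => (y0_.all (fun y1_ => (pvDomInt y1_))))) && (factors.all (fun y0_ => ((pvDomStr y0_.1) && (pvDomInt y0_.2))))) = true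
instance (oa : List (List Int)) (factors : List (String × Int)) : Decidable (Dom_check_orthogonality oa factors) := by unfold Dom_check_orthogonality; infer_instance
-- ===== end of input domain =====

-- B replaces A's pair-outer loops (which rescan all rows once per column pair) by a single
-- pass over the rows building a dict mapping each column pair to its set of observed value
-- pairs, followed by a separate check pass; same return value on all inputs admitted by Pre_.

-- ===== PORT A =====
-- factors[chr(65+i)] (used by both ports): dict lookup, totalized with default 0 — the none case is excluded by Pre_
def pvKeyA (factors : List (String × Int)) (i : Int) : Int :=
  ((PySem.Dict.mk factors).get? (String.mk [Char.ofNat (65 + i).toNat])).getD 0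

def check_orthogonality (oa : List (List Int)) (factors : List (String × Int)) : Bool :=
  let n_factors : Int := factors.length
  (PySem.List.pyRange 0 n_factors 1).all (fun i =>
    (PySem.List.pyRange (i + 1) n_factors 1).all (fun j =>
      let combinations : PySem.Set (Int × Int) :=
        PySem.Set.ofList (oa.map (fun row =>
          (PySem.List.pyGetD row i 0, PySem.List.pyGetD row j 0)))
      PySem.Set.len combinations == pvKeyA factors i * pvKeyA factors j))

-- ===== PORT B =====
-- (row[i], row[j]) for a pair p = (i, j); indexing totalized with default 0, excluded by Pre_
def pvCell (row : List Int) (p : Int × Int) : Int × Int :=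
  (PySem.List.pyGetD row p.1 0, PySem.List.pyGetD row p.2 0)

def check_orthogonality_alt (oa : List (List Int)) (factors : List (String × Int)) : Bool :=
  let n : Int := factors.length
  let pairs : List (Int × Int) :=
    (PySem.List.pyRange 0 n 1).flatMap (fun i =>
      (PySem.List.pyRange (i + 1) n 1).map (fun j => (i, j)))
  -- seen = {p: set() for p in pairs}
  let seen0 : PySem.Dict (Int × Int) (PySem.Set (Int × Int)) :=
    pairs.foldl (fun d p => d.insert p PySem.Set.empty) PySem.Dict.empty
  -- for row in oa: for (i, j) in pairs: seen[(i, j)].add((row[i], row[j]))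
  let seen : PySem.Dict (Int × Int) (PySem.Set (Int × Int)) :=
    oa.foldl (fun d row =>
      pairs.foldl (fun d p =>
        d.modify p PySem.Set.empty (fun s => PySem.Set.add s (pvCell row p))) d) seen0
  pairs.all (fun p =>
    PySem.Set.len (seen.getD p PySem.Set.empty) == pvKeyA factors p.1 * pvKeyA factors p.2)

-- ===== PRECONDITION & SPEC =====
-- Pre_ excludes the inputs on which a missing key chr(65+i) or a row shorter than len(factors)
-- makes the Python raise KeyError/IndexError; this also excludes some inputs on which A still
-- returns False early (at an earlier column pair) before touching the missing key or short row —
-- B's row pass touches every column up front, so B raises there (see claim.json cites).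
def Pre_check_orthogonality (oa : List (List Int)) (factors : List (String × Int)) : Prop :=
  2 ≤ factors.length →
    ((∀ row ∈ oa, factors.length ≤ row.length) ∧
     (∀ i < factors.length,
       ((PySem.Dict.mk factors).get? (String.mk [Char.ofNat (65 + i)])).isSome = true))
instance (oa : List (List Int)) (factors : List (String × Int)) : Decidable (Pre_check_orthogonality oa factors) := by unfold Pre_check_orthogonality; infer_instance

def pvWitness_check_orthogonality : List (List Int) × (List (String × Int)) :=
  ([[0, 0], [0, 1], [1, 0], [1, 1]], [("A", 2), ("B", 2)])

def Spec_check_orthogonality (oa : List (List Int)) (factors : List (String × Int)) (out : Bool) : Prop := out = check_orthogonality_alt oa factors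
instance (oa : List (List Int)) (factors : List (String × Int)) (out : Bool) : Decidable (Spec_check_orthogonality oa factors out) := by unfold Spec_check_orthogonality; infer_instance

-- ===== CLAIM (what is proved, stated in full; the proofs are below) =====
def Claim_equal_check_orthogonality : Prop := ∀ (oa : List (List Int)) (factors : List (String × Int)), Dom_check_orthogonality oa factors → Pre_check_orthogonality oa factors → Spec_check_orthogonality oa factors (check_orthogonality oa factors)

-- ===== LEMMAS AND PROOFS =====

-- the dict comprehension: every key reads as the empty set
theorem pv_seen0_getD (ps : List (Int × Int))
    (d : PySem.Dict (Int × Int) (PySem.Set (Int × Int)))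
    (hd : ∀ q, d.getD q PySem.Set.empty = PySem.Set.empty) (q : Int × Int) :
    (ps.foldl (fun d p => d.insert p PySem.Set.empty) d).getD q PySem.Set.empty
      = PySem.Set.empty := by
  induction ps generalizing d with
  | nil => exact hd q
  | cons p ps ih =>
      simp only [List.foldl_cons]
      refine ih _ (fun q' => ?_)
      rw [PySem.Dict.getD_insert]
      split_ifs with h
      · rfl
      · exact hd q'

-- one row's inner pass over the pairs, read back at key q
theorem pv_inner_getD (row : List Int) (ps : List (Int × Int))
    (d : PySem.Dict (Int × Int) (PySem.Set (Int × Int))) (q : Int × Int) :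
    (ps.foldl (fun d p =>
        d.modify p PySem.Set.empty (fun s => PySem.Set.add s (pvCell row p))) d).getD q PySem.Set.empty
      = if q ∈ ps then PySem.Set.add (d.getD q PySem.Set.empty) (pvCell row q)
        else d.getD q PySem.Set.empty := by
  induction ps generalizing d with
  | nil => simp
  | cons p ps ih =>
      simp only [List.foldl_cons, ih, PySem.Dict.getD_modify, List.mem_cons]
      by_cases hqp : q = p
      · subst hqp
        by_cases hq : q ∈ ps
        · simp [hq]
        · simp [hq]
      · by_cases hq : q ∈ ps <;> simp [hq, hqp]

-- the whole row pass, read back at a key q that the comprehension created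
theorem pv_outer_getD (oa : List (List Int)) (ps : List (Int × Int))
    (d : PySem.Dict (Int × Int) (PySem.Set (Int × Int))) (q : Int × Int) (hq : q ∈ ps) :
    ((oa.foldl (fun d row =>
        ps.foldl (fun d p =>
          d.modify p PySem.Set.empty (fun s => PySem.Set.add s (pvCell row p))) d) d)).getD q PySem.Set.empty
      = (oa.map (fun row => pvCell row q)).foldl PySem.Set.add (d.getD q PySem.Set.empty) := by
  induction oa generalizing d with
  | nil => simp
  | cons row oa ih =>
      simp only [List.foldl_cons, List.map_cons, ih, pv_inner_getD, hq, if_pos]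

-- Bool.all congruence on members
theorem pv_all_congr_mem {α : Type} (l : List α) (p q : α → Bool)
    (h : ∀ x ∈ l, p x = q x) : l.all p = l.all q := by
  induction l with
  | nil => rfl
  | cons x l ih =>
      simp only [List.all_cons, h x (List.mem_cons_self ..),
        ih (fun y hy => h y (List.mem_cons_of_mem _ hy))]

-- ===== VERDICT (by name: the statement is the Claim_ definition above) =====
theorem check_orthogonality_spec : Claim_equal_check_orthogonality := by
  intro oa factors _ _
  unfold Spec_check_orthogonality check_orthogonality check_orthogonality_alt
  simp only []
  rw [pv_all_congr_mem _ _
    (fun p => PySem.Set.len (PySem.Set.ofList (oa.map (fun row => pvCell row p)))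
      == pvKeyA factors p.1 * pvKeyA factors p.2)
    (fun q hq => by
      rw [pv_outer_getD _ _ _ _ hq, pv_seen0_getD _ _ (fun _ => PySem.Dict.getD_empty ..),
        show (PySem.Set.empty : PySem.Set (Int × Int)) = [] from rfl,
        ← PySem.Set.ofList_eq_foldl])]
  rw [List.all_flatMap]
  refine pv_all_congr_mem _ _ _ (fun i _ => ?_)
  rw [List.all_map]
  rfl
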